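-- pv_equiv track=rewrite | github.com/Den4ik5/eyazis_lab3 | parse_text/manager.py | generate
-- ===== SOURCE A (Python) =====
-- def generate(sentences, sorted_sentences):
--     count_sent = 0
--     note = ''
--     for sent1 in sentences:
--         for sent2, key in sorted_sentences:
--             if sent1 == sent2:
--                 if count_sent == 9:
--                     break
--                 else:
--                     count_sent += 1
--                     note += sent1
--     return note
-- ===== SOURCE B (Python) =====
-- def generate(sentences, sorted_sentences):
--     # frequency of each sentence among the keys of sorted_sentences, built once
--     freq = {}
--     for sent, _key in sorted_sentences:
--         freq[sent] = freq.get(sent, 0) + 1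
--     budget = 9
--     parts = []
--     for s in sentences:
--         if budget == 0:
--             break
--         k = freq.get(s, 0)
--         if k > budget:
--             k = budget
--         parts.append(s * k)
--         budget -= k
--     return ''.join(parts)
-- ===== Notes on version B (the rewrite author's own statement) =====
-- stated objective: faster
-- what changed: Instead of rescanning sorted_sentences for every sentence, B builds a frequency dict of the sorted_sentences keys once and appends min(count, remaining budget) copies of each sentence, joining at the end.
import Mathlib
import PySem

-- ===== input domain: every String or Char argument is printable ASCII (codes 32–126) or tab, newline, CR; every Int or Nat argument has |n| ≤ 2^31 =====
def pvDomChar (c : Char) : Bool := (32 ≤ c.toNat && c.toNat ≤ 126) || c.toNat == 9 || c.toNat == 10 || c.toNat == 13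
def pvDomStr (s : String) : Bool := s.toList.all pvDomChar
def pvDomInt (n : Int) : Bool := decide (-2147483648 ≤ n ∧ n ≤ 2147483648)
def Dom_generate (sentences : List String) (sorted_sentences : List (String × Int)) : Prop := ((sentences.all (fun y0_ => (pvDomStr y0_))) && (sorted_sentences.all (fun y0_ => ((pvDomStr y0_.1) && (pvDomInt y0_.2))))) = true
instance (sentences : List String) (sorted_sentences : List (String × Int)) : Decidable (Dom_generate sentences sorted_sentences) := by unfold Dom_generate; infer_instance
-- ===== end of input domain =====

-- B replaces A's O(n·m) rescans of sorted_sentences with a frequency dict built once,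
-- appending min(count, remaining budget) copies per sentence; objective: faster (asymptotic).

-- ===== PORT A =====
-- inner 'for sent2, key in sorted_sentences' loop; 'break' = stop the recursion
def genInner (sent1 : String) : List (String × Int) → Int × String → Int × String
  | [], st => st
  | (sent2, _key) :: rest, (count_sent, note) =>
    if sent1 == sent2 then
      if count_sent == 9 then (count_sent, note)
      else genInner sent1 rest (count_sent + 1, note ++ sent1)
    else genInner sent1 rest (count_sent, note)

def generate (sentences : List String) (sorted_sentences : List (String × Int)) : String :=
  (sentences.foldl (fun st sent1 => genInner sent1 sorted_sentences st) (0, "")).2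

-- ===== PORT B =====
-- s * k (k ≥ 0 in B)
def altStrMul (s : String) (k : Int) : String :=
  String.ofList (PySem.List.pyRepeat s.toList k)

-- the 'for s in sentences' loop with its 'break'
def altLoop (freq : PySem.Dict String Int) : List String → Int → List String → List String
  | [], _budget, parts => parts
  | s :: rest, budget, parts =>
    if budget == 0 then parts
    else
      let k0 := freq.getD s 0
      let k := if k0 > budget then budget else k0
      altLoop freq rest (budget - k) (parts ++ [altStrMul s k])

def generate_alt (sentences : List String) (sorted_sentences : List (String × Int)) : String :=
  let freq := sorted_sentences.foldl (fun d p => d.insert p.1 (d.getD p.1 0 + 1)) PySem.Dict.empty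
  PySem.Str.join "" (altLoop freq sentences 9 [])

-- ===== PRECONDITION & SPEC =====
def Spec_generate (sentences : List String) (sorted_sentences : List (String × Int)) (out : String) : Prop := out = generate_alt sentences sorted_sentences
instance (sentences : List String) (sorted_sentences : List (String × Int)) (out : String) : Decidable (Spec_generate sentences sorted_sentences out) := by unfold Spec_generate; infer_instance

-- ===== CLAIM (what is proved, stated in full; the proofs are below) =====
def Claim_equal_generate : Prop := ∀ (sentences : List String) (sorted_sentences : List (String × Int)), Dom_generate sentences sorted_sentences → Spec_generate sentences sorted_sentences (generate sentences sorted_sentences)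

-- ===== LEMMAS AND PROOFS =====

theorem join_empty_sep (ps : List (List Char)) : PySem.Chars.join [] ps = ps.flatten := by
  induction ps with
  | nil => simp [PySem.Chars.join, List.intercalate]
  | cons p rest ih =>
    cases rest with
    | nil => simp [PySem.Chars.join, List.intercalate]
    | cons q t =>
      rw [PySem.Chars.join_cons_cons, ih]; simp

theorem altStrMul_toList (s : String) (k : Int) :
    (altStrMul s k).toList = (List.replicate k.toNat s.toList).flatten := by
  simp [altStrMul, PySem.List.pyRepeat]

theorem repl_succ (s : String) (k : Int) (hk : 0 ≤ k) :
    (List.replicate (k + 1).toNat s.toList).flatten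
      = s.toList ++ (List.replicate k.toNat s.toList).flatten := by
  have h : (k + 1).toNat = k.toNat + 1 := by omega
  rw [h, List.replicate_succ, List.flatten_cons]

-- A's inner loop adds exactly min(count of sent1 among the keys, 9 - count_sent) copies
theorem genInner_spec (sent1 : String) (ss : List (String × Int)) (c : Int) (note : String)
    (h0 : 0 ≤ c) (h9 : c ≤ 9) :
    genInner sent1 ss (c, note)
      = (c + min ((ss.map Prod.fst).count sent1 : Int) (9 - c),
         String.ofList (note.toList
           ++ (List.replicate (min ((ss.map Prod.fst).count sent1 : Int) (9 - c)).toNat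
                sent1.toList).flatten)) := by
  induction ss generalizing c note with
  | nil =>
    simp only [genInner, List.map_nil, List.count_nil, Nat.cast_zero]
    have hm : min (0 : Int) (9 - c) = 0 := by omega
    rw [hm, Prod.mk.injEq]
    refine ⟨by omega, ?_⟩
    apply String.toList_injective; simp
  | cons hd tl ih =>
    obtain ⟨sent2, key⟩ := hd
    simp only [genInner]
    by_cases heq : sent1 = sent2
    · subst heq
      rw [if_pos (by simp)]
      have hcnt : ((((sent1, key) :: tl).map Prod.fst).count sent1 : Int)
          = ((tl.map Prod.fst).count sent1 : Int) + 1 := by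
        simp
      set n : Int := ((tl.map Prod.fst).count sent1 : Int) with hn
      have hnn : 0 ≤ n := by positivity
      by_cases hc : c = 9
      · subst hc
        rw [if_pos (by simp)]
        rw [hcnt]
        have hm : min (n + 1) (9 - 9) = 0 := by omega
        rw [hm, Prod.mk.injEq]
        refine ⟨by omega, ?_⟩
        apply String.toList_injective; simp
      · rw [if_neg (by simp [hc])]
        rw [ih (c + 1) (note ++ sent1) (by omega) (by omega)]
        rw [hcnt, Prod.mk.injEq]
        have hmin : min (n + 1) (9 - c) = min n (9 - (c + 1)) + 1 := by omega
        refine ⟨by omega, ?_⟩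
        rw [hmin, repl_succ sent1 _ (by omega)]
        apply String.toList_injective
        simp
    · rw [if_neg (by simp [heq])]
      rw [ih c note h0 h9]
      have h2 : (((sent2, key) :: tl).map Prod.fst).count sent1 = (tl.map Prod.fst).count sent1 := by
        simp [List.count_cons]
        exact fun h => heq h.symm
      rw [h2]

theorem altLoop_zero (freq : PySem.Dict String Int) (l : List String) (parts : List String) :
    altLoop freq l 0 parts = parts := by
  cases l <;> simp [altLoop]

theorem altLoop_cons_ne (freq : PySem.Dict String Int) (s : String) (rest : List String)
    (b : Int) (parts : List String) (hb : ¬ b = 0) :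
    altLoop freq (s :: rest) b parts
      = altLoop freq rest (b - (if freq.getD s 0 > b then b else freq.getD s 0))
          (parts ++ [altStrMul s (if freq.getD s 0 > b then b else freq.getD s 0)]) := by
  simp [altLoop, hb]

-- the loop invariant tying A's fold state to B's parts list
theorem loop_spec (ss : List (String × Int)) (sentences : List String) (c : Int) (note : String)
    (parts : List String) (h0 : 0 ≤ c) (h9 : c ≤ 9)
    (hacc : note.toList = (parts.map String.toList).flatten) :
    ((sentences.foldl (fun st sent1 => genInner sent1 ss st) (c, note)).2).toList
      = ((altLoop (PySem.Dict.counter (ss.map Prod.fst)) sentences (9 - c) parts).map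
          String.toList).flatten := by
  induction sentences generalizing c note parts with
  | nil => simpa [List.foldl] using hacc
  | cons s rest ih =>
    rw [List.foldl_cons, genInner_spec s ss c note h0 h9]
    set n : Int := ((ss.map Prod.fst).count s : Int) with hn
    have hnn : 0 ≤ n := by positivity
    by_cases hb : (9 : Int) - c = 0
    · have hm : min n (9 - c) = 0 := by omega
      rw [hm]
      simp only [Int.toNat_zero, List.replicate_zero, List.flatten_nil, List.append_nil, add_zero]
      rw [ih c (String.ofList note.toList) parts h0 h9 (by simpa using hacc)]
      rw [hb, altLoop_zero, altLoop_zero]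
    · rw [altLoop_cons_ne _ _ _ _ _ hb]
      rw [PySem.Dict.getD_counter, ← hn]
      have hkmin : (if n > 9 - c then 9 - c else n) = min n (9 - c) := by
        split_ifs with h <;> omega
      rw [hkmin]
      have hb2 : (9 : Int) - c - min n (9 - c) = 9 - (c + min n (9 - c)) := by ring
      rw [hb2]
      rw [ih (c + min n (9 - c)) _ (parts ++ [altStrMul s (min n (9 - c))])
            (by omega) (by omega) ?_]
      simp [altStrMul_toList, hacc]

-- ===== VERDICT (by name: the statement is the Claim_ definition above) =====
theorem generate_spec : Claim_equal_generate := by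
  intro sentences sorted_sentences _hdom
  unfold Spec_generate generate generate_alt
  apply String.toList_injective
  have hfreq : sorted_sentences.foldl (fun d p => d.insert p.1 (d.getD p.1 0 + 1)) PySem.Dict.empty
      = PySem.Dict.counter (sorted_sentences.map Prod.fst) := by
    rw [← PySem.Dict.foldl_insert_getD_add_one_eq_counter, List.foldl_map]
  simp only [hfreq]
  rw [show (9 : Int) = 9 - 0 from by ring]
  rw [loop_spec sorted_sentences sentences 0 "" [] (by norm_num) (by norm_num) (by simp)]
  simp [PySem.Str.join, join_empty_sep]
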